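-- pv_equiv track=rewrite | github.com/Autistic-Soul/VectorFly | LinAlg_HyperRedstone/LA1_Matrix.py | isMat
-- ===== SOURCE A (Python) =====
-- def isMat(_Array):
--     if type(_Array) != list:
--         return False
--     elif len(_Array) == 0:
--         return False
--     else:
--         for _Each in _Array:
--             if type(_Each) != list:
--                 del _Each
--                 return False
--             elif len(_Each) == 0:
--                 del _Each
--                 return False
--             else:
--                 for _Each2 in _Each:
--                     if (type(_Each2) in [ int, float, complex ]) == False:
--                         del _Each, _Each2
--                         return False
--         flag = len(_Array[0])
--         for _Each in _Array:
--             if len(_Each) != flag: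
--                 del _Each, _Each2
--                 return False
--         del _Each, _Each2
--         return True
-- ===== SOURCE B (Python) =====
-- def isMat(_Array):
--     if type(_Array) != list or len(_Array) == 0:
--         return False
--     expected = None
--     for row in _Array:
--         if type(row) != list or len(row) == 0:
--             return False
--         if expected is None:
--             expected = len(row)
--         elif len(row) != expected:
--             return False
--         for x in row:
--             if type(x) not in (int, float, complex):
--                 return False
--     return True
-- ===== Notes on version B (the rewrite author's own statement) =====
-- stated objective: simpler
-- what changed: B fuses A's two traversals (row/element validation pass, then a second length-comparison pass) into one pass that carries the expected row length as state.
import Mathlib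
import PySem

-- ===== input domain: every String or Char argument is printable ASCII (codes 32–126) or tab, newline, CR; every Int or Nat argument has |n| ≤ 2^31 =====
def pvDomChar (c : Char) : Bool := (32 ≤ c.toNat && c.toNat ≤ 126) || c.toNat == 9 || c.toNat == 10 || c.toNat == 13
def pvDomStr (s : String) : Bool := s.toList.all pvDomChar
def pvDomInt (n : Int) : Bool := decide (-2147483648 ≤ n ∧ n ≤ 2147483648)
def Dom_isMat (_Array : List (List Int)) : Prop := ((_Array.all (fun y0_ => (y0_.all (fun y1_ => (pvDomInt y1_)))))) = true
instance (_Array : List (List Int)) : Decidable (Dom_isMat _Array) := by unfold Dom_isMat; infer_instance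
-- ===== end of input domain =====

-- B fuses A's two row traversals into one pass carrying the expected row length; same results on all inputs.
-- Under the type convention the argument is always a list of lists of ints, so Python's
-- `type(...) != list` tests and `type(x) in [int, float, complex]` tests are constantly
-- false/true respectively; they are transliterated as such (commented in place).

-- ===== PORT A =====
-- first loop of A: per row, `type != list` is always false here; empty row → False;
-- the inner element-type loop never fires (elements are ints).
def isMatLoop1 : List (List Int) → Bool
  | [] => true
  | r :: rs => if r.length = 0 then false else isMatLoop1 rs

-- second loop of A: compare each row's length with flag
def isMatLoop2 (flag : Nat) : List (List Int) → Bool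
  | [] => true
  | r :: rs => if r.length ≠ flag then false else isMatLoop2 flag rs

def isMat (_Array : List (List Int)) : Bool :=
  -- type(_Array) != list: always false under the convention
  if _Array.length = 0 then false
  else if isMatLoop1 _Array then
    match PySem.List.pyGet? _Array 0 with
    | some r0 => isMatLoop2 r0.length _Array   -- flag = len(_Array[0])
    | none => false                            -- unreachable: _Array nonempty
  else false

-- ===== PORT B =====
-- single pass, carrying the expected row length (None before the first row)
def isMatAltGo (expected : Option Int) : List (List Int) → Bool
  | [] => true
  | r :: rs =>
    if r.length = 0 then false
    else match expected with
      | none => isMatAltGo (some (r.length : Int)) rs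
      | some e => if (r.length : Int) ≠ e then false else isMatAltGo (some e) rs

def isMat_alt (_Array : List (List Int)) : Bool :=
  if _Array.length = 0 then false
  else isMatAltGo none _Array

-- ===== PRECONDITION & SPEC =====
def Spec_isMat (_Array : List (List Int)) (out : Bool) : Prop := out = isMat_alt _Array
instance (_Array : List (List Int)) (out : Bool) : Decidable (Spec_isMat _Array out) := by unfold Spec_isMat; infer_instance

-- ===== CLAIM (what is proved, stated in full; the proofs are below) =====
def Claim_equal_isMat : Prop := ∀ (_Array : List (List Int)), Dom_isMat _Array → Spec_isMat _Array (isMat _Array)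

-- ===== LEMMAS AND PROOFS =====
theorem isMatAltGo_eq (rs : List (List Int)) (n : Nat) :
    isMatAltGo (some (n : Int)) rs = (isMatLoop1 rs && isMatLoop2 n rs) := by
  induction rs with
  | nil => simp [isMatAltGo, isMatLoop1, isMatLoop2]
  | cons r rs ih =>
    simp only [isMatAltGo, isMatLoop1, isMatLoop2]
    by_cases h0 : r.length = 0
    · simp [h0]
    · by_cases he : r.length = n
      · simp [he, ih, Bool.and_assoc]
      · have : ((r.length : Int) ≠ (n : Int)) := by exact_mod_cast he
        simp [h0, he, this]

-- ===== VERDICT (by name: the statement is the Claim_ definition above) =====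
theorem isMat_spec : Claim_equal_isMat := by
  intro a _
  unfold Spec_isMat isMat isMat_alt
  cases a with
  | nil => simp
  | cons r rs =>
    by_cases h0 : r.length = 0
    · simp [isMatLoop1, isMatAltGo, h0]
    · cases h1 : isMatLoop1 rs <;>
        simp [isMatLoop1, isMatAltGo, h0, h1, isMatAltGo_eq, isMatLoop2]
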